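-- pv_equiv track=rewrite | github.com/IvanParvanovski/SoftUniPractice | Python/Functions(EXERCISE)/Password_Validator.py | check_password_symbols
-- ===== SOURCE A (Python) =====
-- def check_password_symbols(password):
--
--     right_symbols = False
--     for index in range(len(password)):
--         if 48 <= ord(password[index]) <= 57 or 65 <= ord(password[index]) <= 90 or 97 <= ord(password[index]) <= 122:
--             right_symbols = True
--         else:
--             right_symbols = False
--             break
--     return right_symbols
-- ===== SOURCE B (Python) =====
-- import re
--
-- def check_password_symbols(password):
--     return re.fullmatch(r'[0-9A-Za-z]+', password) is not None
-- ===== Notes on version B (the rewrite author's own statement) =====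
-- stated objective: idiomatic
-- what changed: Replaces the explicit indexed loop of ordinal comparisons (with a mutable flag and break) by a single regex fullmatch of [0-9A-Za-z]+, whose + quantifier reproduces the empty-string-False behaviour.
import Mathlib
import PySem

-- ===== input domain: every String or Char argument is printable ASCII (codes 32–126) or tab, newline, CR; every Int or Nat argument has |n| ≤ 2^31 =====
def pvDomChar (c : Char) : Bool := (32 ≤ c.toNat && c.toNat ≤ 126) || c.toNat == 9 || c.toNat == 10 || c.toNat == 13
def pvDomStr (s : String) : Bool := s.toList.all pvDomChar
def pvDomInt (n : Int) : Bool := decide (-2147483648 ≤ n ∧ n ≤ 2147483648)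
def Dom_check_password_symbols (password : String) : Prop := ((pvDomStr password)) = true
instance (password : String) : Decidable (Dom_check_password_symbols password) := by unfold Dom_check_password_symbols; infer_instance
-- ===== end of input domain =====

-- B replaces A's indexed flag-and-break loop with a regex fullmatch of [0-9A-Za-z]+ (idiomatic, same cost).


-- ===== PORT A =====
-- A's ordinal test on one character (the if-condition, branches in source order)
def pvOrdOkA (c : Char) : Bool :=
  (48 ≤ c.toNat && c.toNat ≤ 57) || (65 ≤ c.toNat && c.toNat ≤ 90) || (97 ≤ c.toNat && c.toNat ≤ 122)

-- the for-loop over indices with the mutable flag and break, as structural recursion over the chars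
def pvLoopA : List Char → Bool → Bool
  | [], flag => flag
  | c :: cs, _ => if pvOrdOkA c then pvLoopA cs true else false

def check_password_symbols (password : String) : Bool :=
  pvLoopA password.toList false

-- ===== PORT B =====
-- B is `re.fullmatch(r'[0-9A-Za-z]+', password) is not None`: the fullmatch of the class-plus
-- pattern succeeds iff the string is nonempty and every char is in the class [0-9A-Za-z];
-- ported as exactly that semantics (no regex engine in Lean).
def pvClassB (c : Char) : Bool :=
  ('0' ≤ c && c ≤ '9') || ('A' ≤ c && c ≤ 'Z') || ('a' ≤ c && c ≤ 'z')

def check_password_symbols_alt (password : String) : Bool :=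
  !password.toList.isEmpty && password.toList.all pvClassB

-- ===== PRECONDITION & SPEC =====
def Spec_check_password_symbols (password : String) (out : Bool) : Prop := out = check_password_symbols_alt password
instance (password : String) (out : Bool) : Decidable (Spec_check_password_symbols password out) := by unfold Spec_check_password_symbols; infer_instance

-- ===== CLAIM (what is proved, stated in full; the proofs are below) =====
def Claim_equal_check_password_symbols : Prop := ∀ (password : String), Dom_check_password_symbols password → Spec_check_password_symbols password (check_password_symbols password)

-- ===== LEMMAS AND PROOFS =====
theorem pvOrdOkA_eq_classB (c : Char) : pvOrdOkA c = pvClassB c := by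
  have h0 : '0'.val.toNat = 48 := rfl
  have h9 : '9'.val.toNat = 57 := rfl
  have hA : 'A'.val.toNat = 65 := rfl
  have hZ : 'Z'.val.toNat = 90 := rfl
  have ha : 'a'.val.toNat = 97 := rfl
  have hz : 'z'.val.toNat = 122 := rfl
  simp only [pvOrdOkA, pvClassB, Char.le_def, UInt32.le_iff_toNat_le, Char.toNat,
    h0, h9, hA, hZ, ha, hz]
  rfl

-- the loop with flag `true` on a nonempty suffix is just `all`
theorem pvLoopA_true (l : List Char) : pvLoopA l true = l.all pvClassB := by
  induction l with
  | nil => rfl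
  | cons c cs ih =>
    simp only [pvLoopA, pvOrdOkA_eq_classB, List.all_cons]
    by_cases h : pvClassB c = true <;> simp [h, ih]

theorem pvLoopA_eq (l : List Char) :
    pvLoopA l false = (!l.isEmpty && l.all pvClassB) := by
  cases l with
  | nil => rfl
  | cons c cs =>
    simp only [pvLoopA, pvOrdOkA_eq_classB, List.isEmpty_cons, List.all_cons]
    by_cases h : pvClassB c = true <;> simp [h, pvLoopA_true]

-- ===== VERDICT (by name: the statement is the Claim_ definition above) =====
theorem check_password_symbols_spec : Claim_equal_check_password_symbols := by
  intro password _
  unfold Spec_check_password_symbols check_password_symbols check_password_symbols_alt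
  exact pvLoopA_eq _
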